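-- pv_equiv track=rewrite | github.com/ajayxthapa/geospatial | UHI-main/2_UEII_CL.py | generate_year_intervals
-- ===== SOURCE A (Python) =====
-- def generate_year_intervals(start_year, end_year, delta_years):
--     """Generate year intervals based on start, end, and delta"""
--     intervals = []
--     current_year = start_year
--
--     while current_year < end_year:
--         next_year = min(current_year + delta_years, end_year)
--         intervals.append((current_year, next_year))
--         current_year = next_year
--
--         # Break if we've reached the end
--         if current_year >= end_year:
--             break
--
--     return intervals
-- ===== SOURCE B (Python) =====
-- def generate_year_intervals(start_year, end_year, delta_years):
--     """Generate year intervals based on start, end, and delta"""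
--     if start_year >= end_year:
--         return []
--     n = -((start_year - end_year) // delta_years)  # = ceil((end - start) / delta)
--     return [(start_year + i * delta_years,
--              min(start_year + (i + 1) * delta_years, end_year))
--             for i in range(n)]
-- ===== Notes on version B (the rewrite author's own statement) =====
-- stated objective: alternative
-- what changed: B replaces A's stepping while-loop by a closed form: it computes the number of intervals with a ceiling division and emits each interval's endpoints directly from its index in a comprehension over range(n).
import Mathlib
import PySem

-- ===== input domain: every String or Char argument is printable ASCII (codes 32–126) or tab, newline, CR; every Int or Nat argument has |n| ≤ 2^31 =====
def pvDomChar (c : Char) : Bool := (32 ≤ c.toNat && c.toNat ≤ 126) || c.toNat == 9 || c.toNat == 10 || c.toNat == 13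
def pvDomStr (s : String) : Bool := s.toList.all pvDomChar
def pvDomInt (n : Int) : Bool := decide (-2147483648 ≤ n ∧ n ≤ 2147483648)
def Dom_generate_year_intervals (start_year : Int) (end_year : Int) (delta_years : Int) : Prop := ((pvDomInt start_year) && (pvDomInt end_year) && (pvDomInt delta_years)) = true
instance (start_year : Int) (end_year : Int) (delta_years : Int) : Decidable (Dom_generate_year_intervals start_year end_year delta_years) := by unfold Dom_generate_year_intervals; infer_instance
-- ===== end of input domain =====

-- B replaces A's stepping while-loop by a closed form: a ceiling division gives the interval count and each pair is computed from its index (alternative decomposition, same cost).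


-- ===== PORT A =====
-- A's while loop; the `delta_years ≤ 0` test only makes the recursion total in Lean
-- (there the Python loops forever; Pre_ excludes those inputs).
def gyiLoopA (end_year delta_years cur : Int) : List (Int × Int) :=
  if _h : cur < end_year then
    if _hd : delta_years ≤ 0 then []
    else
      let next_year := min (cur + delta_years) end_year
      (cur, next_year) :: gyiLoopA end_year delta_years next_year
  else []
termination_by (end_year - cur).toNat
decreasing_by
  simp_wf; omega

def generate_year_intervals (start_year : Int) (end_year : Int) (delta_years : Int) : List (Int × Int) :=
  gyiLoopA end_year delta_years start_year

-- ===== PORT B =====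
def generate_year_intervals_alt (start_year : Int) (end_year : Int) (delta_years : Int) : List (Int × Int) :=
  if start_year ≥ end_year then []
  else
    let n := -(PySem.Int.floordiv (start_year - end_year) delta_years)
    (PySem.List.pyRange 0 n 1).map (fun i =>
      (start_year + i * delta_years, min (start_year + (i + 1) * delta_years) end_year))

-- ===== PRECONDITION & SPEC =====
-- Pre_ excludes exactly the inputs where start_year < end_year and delta_years ≤ 0:
-- there the Python A loops forever (delta < 0) or forever/ZeroDivisionError territory (delta = 0),
-- i.e. A never returns, so nothing is claimed.
def Pre_generate_year_intervals (start_year : Int) (end_year : Int) (delta_years : Int) : Prop :=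
  0 < delta_years ∨ end_year ≤ start_year
instance (start_year : Int) (end_year : Int) (delta_years : Int) : Decidable (Pre_generate_year_intervals start_year end_year delta_years) := by unfold Pre_generate_year_intervals; infer_instance

def pvWitness_generate_year_intervals : Int × Int × Int := (2000, 2010, 3)

def Spec_generate_year_intervals (start_year : Int) (end_year : Int) (delta_years : Int) (out : List (Int × Int)) : Prop := out = generate_year_intervals_alt start_year end_year delta_years
instance (start_year : Int) (end_year : Int) (delta_years : Int) (out : List (Int × Int)) : Decidable (Spec_generate_year_intervals start_year end_year delta_years out) := by unfold Spec_generate_year_intervals; infer_instance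

-- ===== CLAIM =====
def Claim_equal_generate_year_intervals : Prop := ∀ (start_year : Int) (end_year : Int) (delta_years : Int), Dom_generate_year_intervals start_year end_year delta_years → Pre_generate_year_intervals start_year end_year delta_years → Spec_generate_year_intervals start_year end_year delta_years (generate_year_intervals start_year end_year delta_years)

-- ===== LEMMAS AND PROOFS =====
lemma gyiLoopA_closed (e d : Int) (hd : 0 < d) : ∀ cur,
    gyiLoopA e d cur =
      (List.range (-(PySem.Int.floordiv (cur - e) d)).toNat).map
        (fun (k : Nat) => (cur + (k : Int) * d, min (cur + ((k : Int) + 1) * d) e)) := by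
  intro cur
  fun_induction gyiLoopA e d cur
  case case1 cur h hle => omega
  case case2 cur hlt hd2 next ih =>
    have hb := (PySem.Int.floordiv_eq_iff_of_pos (a := next - e) (b := d)
      (q := PySem.Int.floordiv (next - e) d) hd).mp rfl
    by_cases hc : cur + d ≤ e
    · have hnext : next = cur + d := min_eq_left hc
      have hfd : PySem.Int.floordiv (cur - e) d = PySem.Int.floordiv (next - e) d - 1 := by
        rw [PySem.Int.floordiv_eq_iff_of_pos hd]
        constructor <;> nlinarith [hb.1, hb.2]
      have hp0 : PySem.Int.floordiv (next - e) d ≤ 0 := by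
        have hnextle : next ≤ e := min_le_right _ _
        nlinarith [hb.1]
      rw [hfd]
      have hto : (-(PySem.Int.floordiv (next - e) d - 1)).toNat
          = (-(PySem.Int.floordiv (next - e) d)).toNat + 1 := by omega
      rw [hto, List.range_succ_eq_map, List.map_cons, List.map_map, ih]
      refine congrArg₂ List.cons ?_ ?_
      · simp [hnext, min_eq_left hc]
      · refine List.map_congr_left (fun k _ => ?_)
        simp only [Function.comp, hnext, Nat.succ_eq_add_one]
        push_cast
        have h1 : cur + d + (k : Int) * d = cur + ((k : Int) + 1) * d := by ring
        have h2 : cur + d + ((k : Int) + 1) * d = cur + ((k : Int) + 1 + 1) * d := by ring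
        rw [h1, h2]
    · have hnext : next = e := min_eq_right (by omega)
      have hp0 : PySem.Int.floordiv (next - e) d = 0 := by
        have h0 : next - e = 0 := by omega
        rw [h0] at hb ⊢
        have hple : PySem.Int.floordiv 0 d ≤ 0 := by nlinarith [hb.1]
        have hpge : 0 ≤ PySem.Int.floordiv 0 d := by nlinarith [hb.2]
        omega
      have hfd : PySem.Int.floordiv (cur - e) d = -1 := by
        rw [PySem.Int.floordiv_eq_iff_of_pos hd]
        constructor <;> nlinarith
      rw [hfd, ih, hp0]
      norm_num [hnext, min_eq_right (show e ≤ cur + d by omega)]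
    
  case case3 cur h =>
    have hb := (PySem.Int.floordiv_eq_iff_of_pos (a := cur - e) (b := d)
      (q := PySem.Int.floordiv (cur - e) d) hd).mp rfl
    have hq : 0 ≤ PySem.Int.floordiv (cur - e) d := by nlinarith [hb.1, hb.2]
    have : (-(PySem.Int.floordiv (cur - e) d)).toNat = 0 := by omega
    simp [this]

-- ===== VERDICT =====
theorem generate_year_intervals_spec : Claim_equal_generate_year_intervals := by
  intro s e d _ hpre
  unfold Spec_generate_year_intervals generate_year_intervals generate_year_intervals_alt
  by_cases hse : s ≥ e
  · rw [gyiLoopA]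
    simp [hse, show ¬ s < e by omega]
  · have hd : 0 < d := by rcases hpre with h | h <;> omega
    rw [gyiLoopA_closed e d hd s]
    simp only [if_neg hse, PySem.List.pyRange_one, List.map_map,
      Int.sub_zero]
    refine List.map_congr_left (fun k _ => ?_)
    simp
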